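-- pv_equiv track=rewrite | github.com/AhmedAli-00ne/computer_security_project | test.py | RC4_encrypt_decrypt
-- ===== SOURCE A (Python) =====
-- def S_vector(key):
--     S = list(range(256))
--     T = [ord(key[i % len(key)]) for i in range(256)]
--     j = 0
--     for i in range(256):
--         j = (j + S[i] + T[i]) % 256
--         S[i], S[j] = S[j], S[i]
--     return S
--
-- def initial_permutation(S, size):
--     i = 0
--     j = 0
--     K = []
--     for _ in range(size):
--         i = (i + 1) % 256
--         j = (j + S[i]) % 256
--         S[i], S[j] = S[j], S[i]
--         T = (S[i] + S[j]) % 256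
--         K.append(S[T])
--     return K
--
-- def RC4_encrypt_decrypt(plaintext, key):
--     encrypted_data = []
--     S = S_vector(key)
--     K = initial_permutation(S, len(plaintext))
--
--     for i in range(len(plaintext)):
--         encrypted_data.append(ord(plaintext[i]) ^ K[i])
--
--     decrypted_data = ""
--     # Convert the encrypted_data list back to a string for decryption
--     ciphertext = encrypted_data
--     S = S_vector(key)
--     K = initial_permutation(S, len(ciphertext))
--
--     for i in range(len(ciphertext)):
--         decrypted_data += chr(ciphertext[i] ^ K[i])
--
--     return encrypted_data, decrypted_data
-- ===== SOURCE B (Python) =====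
-- def RC4_encrypt_decrypt(plaintext, key):
--     # One KSA + one streaming PRGA pass; RC4 is its own inverse, so the
--     # decrypted text is the plaintext itself -- no second keystream pass.
--     S = list(range(256))
--     j = 0
--     for i in range(256):
--         j = (j + S[i] + ord(key[i % len(key)])) % 256
--         S[i], S[j] = S[j], S[i]
--     i = j = 0
--     encrypted_data = []
--     for ch in plaintext:
--         i = (i + 1) % 256
--         j = (j + S[i]) % 256
--         S[i], S[j] = S[j], S[i]
--         encrypted_data.append(ord(ch) ^ S[(S[i] + S[j]) % 256])
--     return encrypted_data, plaintext
-- ===== Notes on version B (the rewrite author's own statement) =====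
-- stated objective: simpler
-- what changed: B runs the KSA and a single streaming PRGA pass that encrypts each character as the keystream is generated, and returns the plaintext directly as the decrypted text (RC4 is self-inverse), eliminating A's keystream table and its entire second S/K recomputation and decryption loop.
import Mathlib
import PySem

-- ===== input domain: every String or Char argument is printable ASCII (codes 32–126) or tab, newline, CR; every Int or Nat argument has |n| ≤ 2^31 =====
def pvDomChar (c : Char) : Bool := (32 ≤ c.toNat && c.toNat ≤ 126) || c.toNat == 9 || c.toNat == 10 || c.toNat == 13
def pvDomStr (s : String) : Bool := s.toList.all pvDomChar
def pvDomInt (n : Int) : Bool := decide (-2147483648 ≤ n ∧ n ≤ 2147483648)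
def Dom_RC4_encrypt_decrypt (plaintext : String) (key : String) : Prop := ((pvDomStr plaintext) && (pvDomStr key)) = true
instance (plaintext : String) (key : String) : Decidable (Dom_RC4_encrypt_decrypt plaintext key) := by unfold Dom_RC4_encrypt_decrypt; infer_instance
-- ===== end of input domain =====

-- B replaces A's two S/K keystream recomputations by one KSA plus one streaming
-- PRGA pass and returns the plaintext directly as the decrypted text (simpler).


-- ===== PORT A =====
-- simultaneous swap S[i], S[j] = S[j], S[i]
def pvSwap (S : List Nat) (i j : Nat) : List Nat :=
  (S.set i (S.getD j 0)).set j (S.getD i 0)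

-- A's S_vector: KSA with the precomputed T table (key[i % len(key)] is exact
-- for nonempty key, which Pre_ guarantees)
def pvS_vector (key : String) : List Nat :=
  let kl := key.toList
  let T := (List.range 256).map (fun i => (kl.getD (i % kl.length) ' ').toNat)
  ((List.range 256).foldl (fun (st : List Nat × Nat) i =>
      let j := (st.2 + st.1.getD i 0 + T.getD i 0) % 256
      (pvSwap st.1 i j, j)) (List.range 256, 0)).1

-- one iteration of A's initial_permutation loop body
def pvPermStep (st : List Nat × Nat × Nat × List Nat) : List Nat × Nat × Nat × List Nat :=
  let S := st.1
  let i := (st.2.1 + 1) % 256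
  let j := (st.2.2.1 + S.getD i 0) % 256
  let S' := pvSwap S i j
  let T := (S'.getD i 0 + S'.getD j 0) % 256
  (S', i, j, st.2.2.2 ++ [S'.getD T 0])

def pvInitial_permutation (S : List Nat) (size : Nat) : List Nat :=
  ((List.range size).foldl (fun st _ => pvPermStep st) (S, 0, 0, [])).2.2.2

def RC4_encrypt_decrypt (plaintext : String) (key : String) : List Int × String :=
  let pl := plaintext.toList
  let S := pvS_vector key
  let K := pvInitial_permutation S pl.length
  let encrypted := (List.range pl.length).foldl
    (fun acc i => acc ++ [PySem.Int.bxor ((pl.getD i ' ').toNat : Int) ((K.getD i 0 : Nat) : Int)]) []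
  let S2 := pvS_vector key
  let K2 := pvInitial_permutation S2 encrypted.length
  let decrypted := (List.range encrypted.length).foldl
    (fun acc i => acc ++ [Char.ofNat (PySem.Int.bxor (encrypted.getD i 0) ((K2.getD i 0 : Nat) : Int)).toNat]) []
  (encrypted, String.ofList decrypted)

-- ===== PORT B =====
def RC4_encrypt_decrypt_alt (plaintext : String) (key : String) : List Int × String :=
  let kl := key.toList
  let S0 := ((List.range 256).foldl (fun (st : List Nat × Nat) i =>
      let j := (st.2 + st.1.getD i 0 + (kl.getD (i % kl.length) ' ').toNat) % 256
      (pvSwap st.1 i j, j)) (List.range 256, 0)).1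
  let enc := (plaintext.toList.foldl (fun (st : List Nat × Nat × Nat × List Int) ch =>
      let i := (st.2.1 + 1) % 256
      let j := (st.2.2.1 + st.1.getD i 0) % 256
      let S' := pvSwap st.1 i j
      (S', i, j, st.2.2.2 ++
        [PySem.Int.bxor (ch.toNat : Int) ((S'.getD ((S'.getD i 0 + S'.getD j 0) % 256) 0 : Nat) : Int)]))
      (S0, 0, 0, ([] : List Int))).2.2.2
  (enc, plaintext)

-- ===== PRECONDITION & SPEC =====
-- Pre_ excludes only the empty key, on which A raises ZeroDivisionError (and B does too).
def Pre_RC4_encrypt_decrypt (plaintext : String) (key : String) : Prop := key ≠ ""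
instance (plaintext : String) (key : String) : Decidable (Pre_RC4_encrypt_decrypt plaintext key) := by unfold Pre_RC4_encrypt_decrypt; infer_instance

def pvWitness_RC4_encrypt_decrypt : String × String := ("Hi", "k")

def Spec_RC4_encrypt_decrypt (plaintext : String) (key : String) (out : List Int × String) : Prop := out = RC4_encrypt_decrypt_alt plaintext key
instance (plaintext : String) (key : String) (out : List Int × String) : Decidable (Spec_RC4_encrypt_decrypt plaintext key out) := by unfold Spec_RC4_encrypt_decrypt; infer_instance

-- ===== CLAIM (what is proved, stated in full; the proofs are below) =====
def Claim_equal_RC4_encrypt_decrypt : Prop := ∀ (plaintext : String) (key : String), Dom_RC4_encrypt_decrypt plaintext key → Pre_RC4_encrypt_decrypt plaintext key → Spec_RC4_encrypt_decrypt plaintext key (RC4_encrypt_decrypt plaintext key)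

-- ===== LEMMAS AND PROOFS =====

-- B's KSA result (proof-side name for the fold inside RC4_encrypt_decrypt_alt)
def pvKSA (key : String) : List Nat :=
  ((List.range 256).foldl (fun (st : List Nat × Nat) i =>
      let j := (st.2 + st.1.getD i 0 + ((key.toList.getD (i % key.toList.length) ' ').toNat)) % 256
      (pvSwap st.1 i j, j)) (List.range 256, 0)).1

-- keystream as a front-to-back recursion (proof device)
def pvKsRec (S : List Nat) (i j : Nat) : Nat → List Nat
  | 0 => []
  | n + 1 =>
    let i' := (i + 1) % 256
    let j' := (j + S.getD i' 0) % 256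
    let S' := pvSwap S i' j'
    S'.getD ((S'.getD i' 0 + S'.getD j' 0) % 256) 0 :: pvKsRec S' i' j' n

def pvKey (plaintext key : String) : List Nat :=
  pvKsRec (pvKSA key) 0 0 plaintext.toList.length

def pvE (plaintext key : String) : List Int :=
  List.zipWith (fun (c : Char) (k : Nat) => PySem.Int.bxor (c.toNat : Int) (k : Int))
    plaintext.toList (pvKey plaintext key)

theorem foldl_const_iterate {α β : Type} (g : β → β) (l : List α) (init : β) :
    l.foldl (fun st _ => g st) init = g^[l.length] init := by
  induction l generalizing init with
  | nil => rfl
  | cons x xs ih => simp [List.foldl, ih, Function.iterate_succ_apply]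

theorem permStep_iterate (n : Nat) : ∀ (S : List Nat) (i j : Nat) (K : List Nat),
    (pvPermStep^[n] (S, i, j, K)).2.2.2 = K ++ pvKsRec S i j n := by
  induction n with
  | zero => intro S i j K; simp [pvKsRec]
  | succ n ih =>
    intro S i j K
    rw [Function.iterate_succ_apply]
    show (pvPermStep^[n] (pvPermStep (S, i, j, K))).2.2.2 = _
    simp only [pvPermStep, ih, pvKsRec]
    simp

theorem initial_permutation_eq_ksRec (S : List Nat) (n : Nat) :
    pvInitial_permutation S n = pvKsRec S 0 0 n := by
  unfold pvInitial_permutation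
  rw [foldl_const_iterate, List.length_range, permStep_iterate]
  simp

theorem ksRec_length (n : Nat) : ∀ S i j, (pvKsRec S i j n).length = n := by
  induction n with
  | zero => intro S i j; rfl
  | succ n ih => intro S i j; simp [pvKsRec, ih]

-- A's KSA equals B's KSA (the T table entry for i < 256 is key[i % len(key)])
theorem ksa_eq (key : String) : pvS_vector key = pvKSA key := by
  unfold pvS_vector pvKSA
  refine congrArg Prod.fst ?_
  apply PySem.List.foldl_congr_mem
  intro acc x hx
  have hx' : x < 256 := List.mem_range.mp hx
  have hT : ((List.range 256).map
      (fun i => ((key.toList.getD (i % key.toList.length) ' ').toNat))).getD x 0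
      = (key.toList.getD (x % key.toList.length) ' ').toNat := by
    have hx'' : x < ((List.range 256).map
        (fun i => ((key.toList.getD (i % key.toList.length) ' ').toNat))).length := by
      simpa using hx'
    rw [List.getD_eq_getElem _ _ hx'']
    simp
  rw [hT]

-- foldl appending singletons is map
theorem foldl_append_map {α β : Type} (e : α → β) (l : List α) :
    ∀ acc : List β, l.foldl (fun a x => a ++ [e x]) acc = acc ++ l.map e := by
  induction l with
  | nil => intro acc; simp
  | cons x xs ih => intro acc; simp [List.foldl, ih]

-- B's streaming loop, front-to-back (proof device)
def pvEncRec (S : List Nat) (i j : Nat) : List Char → List Int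
  | [] => []
  | c :: cs =>
    let i' := (i + 1) % 256
    let j' := (j + S.getD i' 0) % 256
    let S' := pvSwap S i' j'
    PySem.Int.bxor (c.toNat : Int) ((S'.getD ((S'.getD i' 0 + S'.getD j' 0) % 256) 0 : Nat) : Int)
      :: pvEncRec S' i' j' cs

theorem b_fold_encRec (cs : List Char) : ∀ (S : List Nat) (i j : Nat) (acc : List Int),
    (cs.foldl (fun (st : List Nat × Nat × Nat × List Int) ch =>
      let i := (st.2.1 + 1) % 256
      let j := (st.2.2.1 + st.1.getD i 0) % 256
      let S' := pvSwap st.1 i j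
      (S', i, j, st.2.2.2 ++
        [PySem.Int.bxor (ch.toNat : Int) ((S'.getD ((S'.getD i 0 + S'.getD j 0) % 256) 0 : Nat) : Int)]))
      (S, i, j, acc)).2.2.2 = acc ++ pvEncRec S i j cs := by
  induction cs with
  | nil => intro S i j acc; simp [pvEncRec]
  | cons c cs ih => intro S i j acc; simp only [List.foldl, pvEncRec, ih]; simp

theorem encRec_eq_zip (cs : List Char) : ∀ (S : List Nat) (i j : Nat),
    pvEncRec S i j cs =
    List.zipWith (fun (c : Char) (k : Nat) => PySem.Int.bxor (c.toNat : Int) (k : Int))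
      cs (pvKsRec S i j cs.length) := by
  induction cs with
  | nil => intro S i j; rfl
  | cons c cs ih => intro S i j; simp only [pvEncRec, pvKsRec, List.length_cons, List.zipWith, ih]

theorem pvE_length (plaintext key : String) :
    (pvE plaintext key).length = plaintext.toList.length := by
  unfold pvE pvKey
  rw [List.length_zipWith, ksRec_length, Nat.min_self]

theorem map_range_getD_zip {β : Type} (f : Char → Nat → β) (cs : List Char) :
    ∀ (K : List Nat), K.length = cs.length →
    (List.range cs.length).map (fun i => f (cs.getD i ' ') (K.getD i 0)) =
    List.zipWith f cs K := by
  induction cs with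
  | nil => intro K h; simp
  | cons c cs ih =>
    intro K h
    cases K with
    | nil => simp at h
    | cons k K =>
      rw [List.length_cons, List.range_succ_eq_map, List.map_cons, List.map_map]
      rw [List.zipWith_cons_cons, ← ih K (by simpa using h)]
      refine congrArg₂ _ rfl ?_
      apply List.map_congr_left
      intro x _
      simp

-- A's index-driven appending loop produces exactly pvE
theorem hencA (plaintext key : String) :
    (List.range plaintext.toList.length).foldl
      (fun acc i => acc ++ [PySem.Int.bxor ((plaintext.toList.getD i ' ').toNat : Int)
        (((pvInitial_permutation (pvS_vector key) plaintext.toList.length).getD i 0 : Nat) : Int)]) [] =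
    pvE plaintext key := by
  rw [foldl_append_map, List.nil_append, ksa_eq, initial_permutation_eq_ksRec]
  exact map_range_getD_zip
    (f := fun (c : Char) (k : Nat) => PySem.Int.bxor (c.toNat : Int) (k : Int))
    plaintext.toList (pvKey plaintext key) (ksRec_length _ _ _ _)

theorem map_range_getD_self (cs : List Char) :
    (List.range cs.length).map (fun i => cs.getD i ' ') = cs := by
  induction cs with
  | nil => simp
  | cons c cs ih =>
    rw [List.length_cons, List.range_succ_eq_map, List.map_cons, List.map_map]
    refine congrArg₂ _ rfl ?_
    calc List.map ((fun i => (c :: cs).getD i ' ') ∘ Nat.succ) (List.range cs.length)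
        = List.map (fun i => cs.getD i ' ') (List.range cs.length) :=
          List.map_congr_left (fun x _ => by simp)
      _ = cs := ih

theorem pvE_getD (plaintext key : String) (i : Nat) (hi : i < plaintext.toList.length) :
    (pvE plaintext key).getD i 0 =
    (((plaintext.toList.getD i ' ').toNat ^^^ (pvKey plaintext key).getD i 0 : Nat) : Int) := by
  have hKlen : (pvKey plaintext key).length = plaintext.toList.length := ksRec_length _ _ _ _
  have hElen : (pvE plaintext key).length = plaintext.toList.length := pvE_length _ _
  rw [List.getD_eq_getElem _ _ (by omega)]
  unfold pvE
  rw [List.getElem_zipWith, PySem.Int.bxor_natCast]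
  rw [List.getD_eq_getElem _ _ hi, List.getD_eq_getElem _ _ (by omega)]

-- the decryption loop of A recovers the plaintext
theorem hdecA (plaintext key : String) :
    (List.range (pvE plaintext key).length).foldl
      (fun acc i => acc ++ [Char.ofNat (PySem.Int.bxor ((pvE plaintext key).getD i 0)
        (((pvInitial_permutation (pvS_vector key) (pvE plaintext key).length).getD i 0 : Nat) : Int)).toNat]) [] =
    plaintext.toList := by
  rw [foldl_append_map, List.nil_append, pvE_length, ksa_eq, initial_permutation_eq_ksRec]
  have hstep : ∀ i ∈ List.range plaintext.toList.length,
      Char.ofNat (PySem.Int.bxor ((pvE plaintext key).getD i 0)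
        (((pvKsRec (pvKSA key) 0 0 plaintext.toList.length).getD i 0 : Nat) : Int)).toNat =
      plaintext.toList.getD i ' ' := by
    intro i hi
    have hi' : i < plaintext.toList.length := List.mem_range.mp hi
    rw [pvE_getD plaintext key i hi']
    show (Char.ofNat (PySem.Int.bxor _ (((pvKey plaintext key).getD i 0 : Nat) : Int)).toNat) = _
    rw [PySem.Int.bxor_natCast, Nat.xor_xor_cancel_right]
    rw [Int.toNat_natCast]
    exact Char.ofNat_toNat _
  rw [List.map_congr_left hstep, map_range_getD_self]

-- ===== assembling the two ports =====

theorem B_eq (plaintext key : String) :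
    RC4_encrypt_decrypt_alt plaintext key = (pvE plaintext key, plaintext) := by
  unfold RC4_encrypt_decrypt_alt
  show ((plaintext.toList.foldl (fun (st : List Nat × Nat × Nat × List Int) ch =>
      let i := (st.2.1 + 1) % 256
      let j := (st.2.2.1 + st.1.getD i 0) % 256
      let S' := pvSwap st.1 i j
      (S', i, j, st.2.2.2 ++
        [PySem.Int.bxor (ch.toNat : Int) ((S'.getD ((S'.getD i 0 + S'.getD j 0) % 256) 0 : Nat) : Int)]))
      (pvKSA key, 0, 0, ([] : List Int))).2.2.2, plaintext) = _
  rw [b_fold_encRec, List.nil_append, encRec_eq_zip]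
  rfl

theorem A_eq (plaintext key : String) :
    RC4_encrypt_decrypt plaintext key = (pvE plaintext key, plaintext) := by
  unfold RC4_encrypt_decrypt
  have hE := hencA plaintext key
  simp only [hE]
  rw [hdecA plaintext key, String.ofList_toList]

-- ===== VERDICT =====
theorem RC4_encrypt_decrypt_spec : Claim_equal_RC4_encrypt_decrypt := by
  intro plaintext key _hd _hpre
  unfold Spec_RC4_encrypt_decrypt
  rw [A_eq plaintext key, B_eq plaintext key]
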